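-- pv_equiv track=rewrite | github.com/cz-fish/advent-of-code | 2018/vis/11.py | find_best_of_size
-- ===== SOURCE A (Python) =====
-- def find_best_of_size(all_powers, size):
--     hei = len(all_powers)
--     wid = len(all_powers[0])
--     best = None
--     best_coord = None
--     columns = [
--         sum(all_powers[y][x] for y in range(size))
--         for x in range(wid)
--     ]
--     for y in range(hei - size + 1):
--         value = sum(columns[0:size])
--         for x in range(0, wid - size + 1):
--             if best is None or value > best:
--                 best = value
--                 best_coord = (x, y)
--             if x < wid - size:
--                 value = value - columns[x] + columns[x+size]
--         if y < hei - size: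
--             for x in range(wid):
--                 columns[x] = columns[x] - all_powers[y][x] + all_powers[y+size][x]
--     return best_coord, best
-- ===== SOURCE B (Python) =====
-- def find_best_of_size(all_powers, size):
--     hei = len(all_powers)
--     wid = len(all_powers[0])
--     # 2D prefix-sum table: P[i][j] = sum of all_powers[r][c] for r < i, c < j
--     P = [[0] * (wid + 1)]
--     prev = P[0]
--     for row in all_powers:
--         cur = [0]
--         acc = 0
--         for j in range(wid):
--             acc += row[j]
--             cur.append(prev[j + 1] + acc)
--         P.append(cur)
--         prev = cur
--     best = None
--     best_coord = None
--     for y in range(hei - size + 1):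
--         Ptop = P[y]
--         Pbot = P[y + size]
--         for x in range(wid - size + 1):
--             v = Pbot[x + size] - Ptop[x + size] - Pbot[x] + Ptop[x]
--             if best is None or v > best:
--                 best = v
--                 best_coord = (x, y)
--     return best_coord, best
-- ===== Notes on version B (the rewrite author's own statement) =====
-- stated objective: alternative
-- what changed: Replaces A's incrementally-maintained column sums and horizontal sliding window by a 2D prefix-sum table built once, each square sum then read off with the four-corner inclusion-exclusion formula; same scan order and strict-> selection.
-- outside the precondition, e.g. on find_best_of_size([[1], [2]], 2): A returns (None, None), B returns (None, None)
import Mathlib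
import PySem

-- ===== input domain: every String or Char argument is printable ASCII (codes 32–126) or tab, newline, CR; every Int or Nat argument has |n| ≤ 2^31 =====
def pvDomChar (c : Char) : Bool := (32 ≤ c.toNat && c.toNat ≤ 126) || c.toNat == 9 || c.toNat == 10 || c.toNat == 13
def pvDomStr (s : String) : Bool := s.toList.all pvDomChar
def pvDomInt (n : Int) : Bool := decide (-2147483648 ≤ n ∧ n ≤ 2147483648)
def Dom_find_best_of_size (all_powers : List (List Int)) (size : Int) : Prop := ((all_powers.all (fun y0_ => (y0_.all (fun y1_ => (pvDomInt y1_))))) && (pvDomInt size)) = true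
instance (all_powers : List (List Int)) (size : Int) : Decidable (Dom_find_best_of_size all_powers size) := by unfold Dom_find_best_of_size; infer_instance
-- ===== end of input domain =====

-- B replaces A's incrementally-maintained column sums and sliding window by a 2D prefix-sum
-- table read with the four-corner formula; same scan order, same strict comparison (objective:
-- alternative decomposition, same asymptotic cost). Equivalence is about the return value.

-- ===== PORT A =====
-- A-side helpers: the inner x-loop body, the inner x-loop, and the outer y-loop body.
-- IndexError sites (all_powers[0], columns[x], all_powers[y][x]) are pyGetD with a default and
-- 'best'/'best_coord' are Options: Pre_find_best_of_size excludes exactly the inputs where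
-- Python raises or where the Options stay None, so the defaults are never reached there.
def pvAStep (wid size : Int) (columns : List Int) (y : Int)
    (s : (Option Int × Option (Int × Int)) × Int) (x : Int) :
    (Option Int × Option (Int × Int)) × Int :=
  let value := s.2
  let sel :=
    if (match s.1.1 with | none => true | some b => decide (value > b)) then
      (some value, some (x, y))
    else s.1
  let value :=
    if x < wid - size then
      value - PySem.List.pyGetD columns x 0 + PySem.List.pyGetD columns (x + size) 0
    else value
  (sel, value)

def pvAInner (wid size : Int) (columns : List Int) (y : Int)
    (st : Option Int × Option (Int × Int)) : (Option Int × Option (Int × Int)) × Int :=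
  (PySem.List.pyRange 0 (wid - size + 1) 1).foldl (pvAStep wid size columns y)
    (st, (PySem.List.slice columns (some 0) (some size)).sum)

def pvAOuterStep (all_powers : List (List Int)) (hei wid size : Int)
    (st : (Option Int × Option (Int × Int)) × List Int) (y : Int) :
    (Option Int × Option (Int × Int)) × List Int :=
  let columns := st.2
  let inner := pvAInner wid size columns y st.1
  let columns :=
    if y < hei - size then
      (PySem.List.pyRange 0 wid 1).map (fun x =>
        PySem.List.pyGetD columns x 0
          - PySem.List.pyGetD (PySem.List.pyGetD all_powers y []) x 0
          + PySem.List.pyGetD (PySem.List.pyGetD all_powers (y + size) []) x 0)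
    else columns
  (inner.1, columns)

def find_best_of_size (all_powers : List (List Int)) (size : Int) : (Int × Int) × Int :=
  let hei : Int := PySem.List.len all_powers
  let wid : Int := PySem.List.len (PySem.List.pyGetD all_powers 0 [])
  let columns : List Int :=
    (PySem.List.pyRange 0 wid 1).map (fun x =>
      ((PySem.List.pyRange 0 size 1).map (fun y =>
        PySem.List.pyGetD (PySem.List.pyGetD all_powers y []) x 0)).sum)
  let fin :=
    (PySem.List.pyRange 0 (hei - size + 1) 1).foldl
      (pvAOuterStep all_powers hei wid size) ((none, none), columns)
  (fin.1.2.getD (-1, -1), fin.1.1.getD 0)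

-- ===== PORT B =====
-- B-side helpers: one prefix-table row build, the table fold step, and the selection y-step.
def pvBRow (wid : Int) (prev row : List Int) : List Int × Int :=
  (PySem.List.pyRange 0 wid 1).foldl
    (fun (cs : List Int × Int) j =>
      let acc := cs.2 + PySem.List.pyGetD row j 0
      (cs.1 ++ [PySem.List.pyGetD prev (j + 1) 0 + acc], acc))
    ([0], 0)

def pvBTabStep (wid : Int) (st : List (List Int) × List Int) (row : List Int) :
    List (List Int) × List Int :=
  let cur := (pvBRow wid st.2 row).1
  (st.1 ++ [cur], cur)

def pvBSelStep (P : List (List Int)) (wid size : Int)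
    (st : Option Int × Option (Int × Int)) (y : Int) : Option Int × Option (Int × Int) :=
  let ptop := PySem.List.pyGetD P y []
  let pbot := PySem.List.pyGetD P (y + size) []
  (PySem.List.pyRange 0 (wid - size + 1) 1).foldl
    (fun st x =>
      let v := PySem.List.pyGetD pbot (x + size) 0 - PySem.List.pyGetD ptop (x + size) 0
        - PySem.List.pyGetD pbot x 0 + PySem.List.pyGetD ptop x 0
      if (match st.1 with | none => true | some b => decide (v > b)) then (some v, some (x, y))
      else st)
    st

def find_best_of_size_alt (all_powers : List (List Int)) (size : Int) : (Int × Int) × Int :=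
  let hei : Int := PySem.List.len all_powers
  let wid : Int := PySem.List.len (PySem.List.pyGetD all_powers 0 [])
  let zrow : List Int := PySem.List.pyRepeat [0] (wid + 1)
  let tab := all_powers.foldl (pvBTabStep wid) ([zrow], zrow)
  let fin :=
    (PySem.List.pyRange 0 (hei - size + 1) 1).foldl
      (pvBSelStep tab.1 wid size) (none, none)
  (fin.2.getD (-1, -1), fin.1.getD 0)

-- ===== PRECONDITION & SPEC =====
-- Pre_ = exactly the inputs where Python A returns normally with a (coord, int) value:
-- a nonempty grid whose rows are at least as long as row 0 (shorter rows raise IndexError),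
-- 0 ≤ size (negative sizes raise IndexError), size ≤ hei (else IndexError building columns)
-- and size ≤ wid (else A returns (None, None), which is not a value of the declared type).
def Pre_find_best_of_size (all_powers : List (List Int)) (size : Int) : Prop :=
  all_powers ≠ [] ∧ 0 ≤ size ∧ size ≤ (all_powers.length : Int) ∧
    size ≤ ((all_powers.headD []).length : Int) ∧
    ∀ r ∈ all_powers, (all_powers.headD []).length ≤ r.length
instance (all_powers : List (List Int)) (size : Int) :
    Decidable (Pre_find_best_of_size all_powers size) := by
  unfold Pre_find_best_of_size; infer_instance

def pvWitness_find_best_of_size : List (List Int) × Int := ([[1]], 1)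

def Spec_find_best_of_size (all_powers : List (List Int)) (size : Int) (out : (Int × Int) × Int) : Prop := out = find_best_of_size_alt all_powers size
instance (all_powers : List (List Int)) (size : Int) (out : (Int × Int) × Int) : Decidable (Spec_find_best_of_size all_powers size out) := by unfold Spec_find_best_of_size; infer_instance

-- ===== CLAIM (what is proved, stated in full; the proofs are below) =====
def Claim_equal_find_best_of_size : Prop := ∀ (all_powers : List (List Int)) (size : Int), Dom_find_best_of_size all_powers size → Pre_find_best_of_size all_powers size → Spec_find_best_of_size all_powers size (find_best_of_size all_powers size)

-- ===== LEMMAS AND PROOFS =====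

-- Reference values: grid entry, column sum of `sz` entries, square value, prefix rectangle.
def pvA' (ap : List (List Int)) (r c : Int) : Int :=
  PySem.List.pyGetD (PySem.List.pyGetD ap r []) c 0

def pvCol (ap : List (List Int)) (sz : Nat) (y x : Int) : Int :=
  ∑ i ∈ Finset.range sz, pvA' ap (y + i) x

def pvV (ap : List (List Int)) (sz : Nat) (y x : Int) : Int :=
  ∑ j ∈ Finset.range sz, pvCol ap sz y (x + j)

def pvRect (ap : List (List Int)) (i j : Nat) : Int :=
  ∑ r ∈ Finset.range i, ∑ c ∈ Finset.range j, pvA' ap (r : Int) (c : Int)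

def pvRowT (ap : List (List Int)) (W i : Nat) : List Int :=
  (List.range (W + 1)).map (fun j => pvRect ap i j)

-- Canonical selection fold both ports reduce to.
def pvSel (st : Option Int × Option (Int × Int)) (c : Int × Int) (v : Int) :
    Option Int × Option (Int × Int) :=
  if (match st.1 with | none => true | some b => decide (v > b)) then (some v, some c) else st

def pvCanonX (ap : List (List Int)) (sz : Nat) (y a b : Int)
    (st : Option Int × Option (Int × Int)) : Option Int × Option (Int × Int) :=
  (PySem.List.pyRange a b 1).foldl (fun st x => pvSel st (x, y) (pvV ap sz y x)) st

lemma pvListSum (f : Nat → Int) (n : Nat) :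
    ((List.range n).map f).sum = ∑ i ∈ Finset.range n, f i := by
  induction n with
  | zero => simp
  | succ n ih => simp [List.range_succ, Finset.sum_range_succ, ih]

lemma pvSlide (f : Int → Int) (s : Nat) (y : Int) :
    ∑ i ∈ Finset.range s, f (y + 1 + (i : Int)) =
      (∑ i ∈ Finset.range s, f (y + (i : Int))) - f y + f (y + (s : Int)) := by
  have h1 := Finset.sum_range_succ (fun i : Nat => f (y + (i : Int))) s
  have h2 := Finset.sum_range_succ' (fun i : Nat => f (y + (i : Int))) s
  have h3 : ∀ i : Nat, f (y + ((i : Int) + 1)) = f (y + 1 + (i : Int)) := by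
    intro i; ring_nf
  simp only [Nat.cast_add, Nat.cast_one, h3, Nat.cast_zero, add_zero] at h2
  rw [h1] at h2
  linarith

lemma pvSumSub (g : Nat → Int) (y s : Nat) :
    ∑ r ∈ Finset.range (y + s), g r - ∑ r ∈ Finset.range y, g r
      = ∑ i ∈ Finset.range s, g (y + i) := by
  induction s with
  | zero => simp
  | succ s ih =>
    rw [show y + (s+1) = (y+s)+1 by ring, Finset.sum_range_succ, Finset.sum_range_succ]
    linarith [ih]

lemma pvFourCorner (ap : List (List Int)) (sz : Nat) (y x : Nat) :
    pvRect ap (y + sz) (x + sz) - pvRect ap y (x + sz) - pvRect ap (y + sz) x + pvRect ap y x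
      = pvV ap sz (y : Int) (x : Int) := by
  have hrow : ∀ r : Nat,
      (∑ c ∈ Finset.range (x + sz), pvA' ap r c) - ∑ c ∈ Finset.range x, pvA' ap r c
        = ∑ j ∈ Finset.range sz, pvA' ap r (x + j) := fun r => pvSumSub _ x sz
  have h1 : pvRect ap (y + sz) (x + sz) - pvRect ap y (x + sz)
      = ∑ i ∈ Finset.range sz, ∑ c ∈ Finset.range (x + sz), pvA' ap ((y + i : Nat) : Int) c :=
    pvSumSub _ y sz
  have h2 : pvRect ap (y + sz) x - pvRect ap y x
      = ∑ i ∈ Finset.range sz, ∑ c ∈ Finset.range x, pvA' ap ((y + i : Nat) : Int) c :=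
    pvSumSub _ y sz
  have h4 : pvV ap sz (y : Int) (x : Int)
      = ∑ i ∈ Finset.range sz, ∑ j ∈ Finset.range sz, pvA' ap ((y:Int) + i) ((x:Int) + j) := by
    unfold pvV pvCol
    rw [Finset.sum_comm]
  rw [h4]
  have hsplit : pvRect ap (y + sz) (x + sz) - pvRect ap y (x + sz) - pvRect ap (y + sz) x
        + pvRect ap y x
      = (pvRect ap (y + sz) (x + sz) - pvRect ap y (x + sz))
        - (pvRect ap (y + sz) x - pvRect ap y x) := by ring
  rw [hsplit, h1, h2, ← Finset.sum_sub_distrib]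
  refine Finset.sum_congr rfl fun i _ => ?_
  rw [hrow]
  refine Finset.sum_congr rfl fun j _ => ?_
  congr 1 <;> push_cast <;> ring

-- ----- A side -----

lemma pvAInner_fold (ap : List (List Int)) (sz : Nat) (wid : Int) (y : Int)
    (cols : List Int)
    (hcols : ∀ x : Int, 0 ≤ x → x < wid → PySem.List.pyGetD cols x 0 = pvCol ap sz y x) :
    ∀ (n : Nat) (x0 : Int), 0 ≤ x0 → x0 + (n : Int) = wid - (sz : Int) + 1 →
    ∀ st, ((PySem.List.pyRange x0 (wid - (sz : Int) + 1) 1).foldl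
        (pvAStep wid (sz : Int) cols y) (st, pvV ap sz y x0)).1
      = pvCanonX ap sz y x0 (wid - (sz : Int) + 1) st := by
  intro n
  induction n with
  | zero =>
    intro x0 hx0 hend st
    rw [pvCanonX, PySem.List.pyRange_one_eq_nil (by omega)]
    simp
  | succ n ih =>
    intro x0 hx0 hend st
    have hlt : x0 < wid - (sz : Int) + 1 := by push_cast at hend ⊢; omega
    rw [pvCanonX, PySem.List.pyRange_one_cons hlt]
    simp only [List.foldl_cons]
    have hstep : pvAStep wid (sz : Int) cols y (st, pvV ap sz y x0) x0
        = (pvSel st (x0, y) (pvV ap sz y x0),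
           if x0 < wid - (sz : Int) then
             pvV ap sz y x0 - PySem.List.pyGetD cols x0 0
               + PySem.List.pyGetD cols (x0 + (sz : Int)) 0
           else pvV ap sz y x0) := by
      simp [pvAStep, pvSel]
    rw [hstep]
    by_cases hn : n = 0
    · subst hn
      rw [PySem.List.pyRange_one_eq_nil (by push_cast at hend; omega)]
      simp
    · have hlt2 : x0 < wid - (sz : Int) := by
        have : 1 ≤ (n : Int) := by exact_mod_cast Nat.one_le_iff_ne_zero.mpr hn
        omega
      have hval : (if x0 < wid - (sz : Int) then
             pvV ap sz y x0 - PySem.List.pyGetD cols x0 0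
               + PySem.List.pyGetD cols (x0 + (sz : Int)) 0
           else pvV ap sz y x0) = pvV ap sz y (x0 + 1) := by
        rw [if_pos hlt2, hcols x0 hx0 (by omega), hcols (x0 + (sz : Int)) (by omega) (by omega)]
        unfold pvV
        exact (pvSlide (fun x => pvCol ap sz y x) sz x0).symm
      rw [hval]
      exact ih (x0 + 1) (by omega) (by push_cast at hend ⊢; omega) _

lemma pvColsInit (ap : List (List Int)) (sz : Nat) (wid : Int) :
    (PySem.List.pyRange 0 wid 1).map (fun x =>
        ((PySem.List.pyRange 0 (sz : Int) 1).map (fun y =>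
          PySem.List.pyGetD (PySem.List.pyGetD ap y []) x 0)).sum)
      = (PySem.List.pyRange 0 wid 1).map (fun x => pvCol ap sz 0 x) := by
  refine List.map_congr_left fun x _ => ?_
  rw [PySem.List.pyRange_one]
  simp only [sub_zero, Int.toNat_natCast, List.map_map]
  rw [pvListSum]
  unfold pvCol
  refine Finset.sum_congr rfl fun i _ => ?_
  simp [pvA']

lemma pvSliceSum (ap : List (List Int)) (sz : Nat) (wid : Int) (y : Int)
    (hw : (sz : Int) ≤ wid) :
    (PySem.List.slice ((PySem.List.pyRange 0 wid 1).map (fun x => pvCol ap sz y x))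
        (some 0) (some (sz : Int))).sum = pvV ap sz y 0 := by
  rw [PySem.List.slice_zero_start, PySem.List.slice_to_natCast]
  rw [PySem.List.pyRange_one_append 0 (sz : Int) wid (by positivity) hw, List.map_append,
    List.take_append_of_le_length (by simp [PySem.List.length_pyRange_one]),
    List.take_of_length_le (by simp [PySem.List.length_pyRange_one]),
    PySem.List.pyRange_one]
  simp only [sub_zero, Int.toNat_natCast, List.map_map]
  rw [pvListSum]
  unfold pvV
  refine Finset.sum_congr rfl fun j _ => ?_
  simp

lemma pvColsGet (ap : List (List Int)) (sz : Nat) (wid y x : Int)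
    (h0 : 0 ≤ x) (h1 : x < wid) :
    PySem.List.pyGetD ((PySem.List.pyRange 0 wid 1).map (fun x => pvCol ap sz y x)) x 0
      = pvCol ap sz y x :=
  PySem.List.pyGetD_map_pyRange_of_nonneg _ _ _ _ h0 h1

lemma pvColsNext (ap : List (List Int)) (sz : Nat) (wid y : Int) :
    (PySem.List.pyRange 0 wid 1).map (fun x =>
        PySem.List.pyGetD ((PySem.List.pyRange 0 wid 1).map (fun x => pvCol ap sz y x)) x 0
          - PySem.List.pyGetD (PySem.List.pyGetD ap y []) x 0
          + PySem.List.pyGetD (PySem.List.pyGetD ap (y + (sz : Int)) []) x 0)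
      = (PySem.List.pyRange 0 wid 1).map (fun x => pvCol ap sz (y + 1) x) := by
  refine List.map_congr_left fun x hx => ?_
  rw [PySem.List.mem_pyRange_one] at hx
  rw [pvColsGet ap sz wid y x hx.1 hx.2]
  have h := pvSlide (fun r => pvA' ap r x) sz y
  unfold pvCol
  rw [h]
  simp [pvA']

lemma pvAOuter_fold (ap : List (List Int)) (sz : Nat) (hei wid : Int)
    (hw : (sz : Int) ≤ wid) :
    ∀ (n : Nat) (y0 : Int), 0 ≤ y0 → y0 + (n : Int) = hei - (sz : Int) + 1 →
    ∀ st, ((PySem.List.pyRange y0 (hei - (sz : Int) + 1) 1).foldl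
        (pvAOuterStep ap hei wid (sz : Int))
        (st, (PySem.List.pyRange 0 wid 1).map (fun x => pvCol ap sz y0 x))).1
      = (PySem.List.pyRange y0 (hei - (sz : Int) + 1) 1).foldl
          (fun st y => pvCanonX ap sz y 0 (wid - (sz : Int) + 1) st) st := by
  intro n
  induction n with
  | zero =>
    intro y0 h0 hend st
    rw [PySem.List.pyRange_one_eq_nil (a := y0) (b := hei - (sz : Int) + 1) (by omega)]
    simp
  | succ n ih =>
    intro y0 h0 hend st
    have hlt : y0 < hei - (sz : Int) + 1 := by push_cast at hend; omega
    rw [PySem.List.pyRange_one_cons hlt]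
    simp only [List.foldl_cons]
    have hinner : (pvAInner wid (sz : Int)
          ((PySem.List.pyRange 0 wid 1).map (fun x => pvCol ap sz y0 x)) y0 st).1
        = pvCanonX ap sz y0 0 (wid - (sz : Int) + 1) st := by
      unfold pvAInner
      rw [pvSliceSum ap sz wid y0 hw]
      exact pvAInner_fold ap sz wid y0 _
        (fun x hx1 hx2 => pvColsGet ap sz wid y0 x hx1 hx2)
        (wid - (sz : Int) + 1).toNat 0 le_rfl (by omega) st
    have hstep : pvAOuterStep ap hei wid (sz : Int)
        (st, (PySem.List.pyRange 0 wid 1).map (fun x => pvCol ap sz y0 x)) y0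
        = (pvCanonX ap sz y0 0 (wid - (sz : Int) + 1) st,
           if y0 < hei - (sz : Int) then
             (PySem.List.pyRange 0 wid 1).map (fun x => pvCol ap sz (y0 + 1) x)
           else (PySem.List.pyRange 0 wid 1).map (fun x => pvCol ap sz y0 x)) := by
      simp only [pvAOuterStep]
      rw [hinner]
      by_cases hc : y0 < hei - (sz : Int)
      · rw [if_pos hc, if_pos hc, pvColsNext]
      · rw [if_neg hc, if_neg hc]
    rw [hstep]
    by_cases hn : n = 0
    · subst hn
      rw [PySem.List.pyRange_one_eq_nil (a := y0 + 1) (b := hei - (sz : Int) + 1)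
        (by push_cast at hend; omega)]
      simp
    · have hc : y0 < hei - (sz : Int) := by
        have : 1 ≤ (n : Int) := by exact_mod_cast Nat.one_le_iff_ne_zero.mpr hn
        push_cast at hend
        omega
      rw [if_pos hc]
      exact ih (y0 + 1) (by omega) (by push_cast at hend ⊢; omega) _

-- ----- B side -----

lemma pvBRow_eq (row prev : List Int) (w : Nat) :
    pvBRow ((w : Nat) : Int) prev row
      = ([0] ++ (List.range w).map (fun (j : Nat) =>
            PySem.List.pyGetD prev ((j : Int) + 1) 0
              + ∑ c ∈ Finset.range (j + 1), PySem.List.pyGetD row (c : Int) 0),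
         ∑ c ∈ Finset.range w, PySem.List.pyGetD row (c : Int) 0) := by
  induction w with
  | zero =>
    rw [pvBRow]
    rw [show ((0 : Nat) : Int) = 0 by simp, PySem.List.pyRange_one_eq_nil le_rfl]
    simp
  | succ w ih =>
    rw [pvBRow, show ((w + 1 : Nat) : Int) = (w : Int) + 1 by push_cast; ring,
      PySem.List.pyRange_one_succ_right (by positivity), List.foldl_append]
    rw [pvBRow] at ih
    rw [ih]
    simp only [List.foldl_cons, List.foldl_nil]
    rw [List.range_succ, List.map_append]
    refine Prod.ext ?_ ?_
    · simp only [List.map_cons, List.map_nil, List.append_assoc]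
      congr 2
      rw [Finset.sum_range_succ]
    · simp [Finset.sum_range_succ]

lemma pvRowTGet (ap : List (List Int)) (W i : Nat) (j : Int)
    (h0 : 0 ≤ j) (hj : j.toNat ≤ W) :
    PySem.List.pyGetD (pvRowT ap W i) j 0 = pvRect ap i j.toNat := by
  rw [show j = ((j.toNat : Nat) : Int) by omega, PySem.List.pyGetD_natCast, pvRowT,
    List.getD_eq_getElem?_getD, List.getElem?_map, List.getElem?_range (by omega)]
  simp only [Option.map_some, Option.getD_some]
  congr 1

lemma pvBRowT_step (ap : List (List Int)) (W k : Nat) (row : List Int)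
    (hrow : ∀ c : Int, PySem.List.pyGetD row c 0 = pvA' ap (k : Int) c) :
    (pvBRow ((W : Nat) : Int) (pvRowT ap W k) row).1 = pvRowT ap W (k + 1) := by
  rw [pvBRow_eq]
  have hrect0 : pvRect ap (k + 1) 0 = 0 := by simp [pvRect]
  have hR : pvRowT ap W (k + 1)
      = 0 :: (List.range W).map (fun j => pvRect ap (k + 1) (j + 1)) := by
    rw [pvRowT, List.range_succ_eq_map]
    simp only [List.map_cons, List.map_map]
    rw [hrect0]
    rfl
  rw [hR]
  refine List.cons_eq_cons.mpr ⟨rfl, ?_⟩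
  refine List.map_congr_left fun j hj => ?_
  rw [List.mem_range] at hj
  rw [show ((j : Int) + 1) = (((j + 1 : Nat) : Nat) : Int) by push_cast; ring,
    pvRowTGet ap W k ((j + 1 : Nat) : Int) (by positivity) (by simp; omega)]
  have hsum : ∑ c ∈ Finset.range (j + 1), PySem.List.pyGetD row (c : Int) 0
      = ∑ c ∈ Finset.range (j + 1), pvA' ap (k : Int) (c : Int) :=
    Finset.sum_congr rfl fun c _ => hrow c
  rw [hsum, show (((j + 1 : Nat) : Int)).toNat = j + 1 by omega]
  simp only [pvRect]
  exact (Finset.sum_range_succ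
    (fun r => ∑ c ∈ Finset.range (j + 1), pvA' ap (r : Int) (c : Int)) k).symm

lemma pvBTab_eq (ap : List (List Int)) (W : Nat) :
    ∀ k ≤ ap.length,
      (ap.take k).foldl (pvBTabStep ((W : Nat) : Int)) ([pvRowT ap W 0], pvRowT ap W 0)
        = ((List.range (k + 1)).map (pvRowT ap W), pvRowT ap W k) := by
  intro k
  induction k with
  | zero => intro _; simp [List.range_one]
  | succ k ih =>
    intro hk
    have hk' : k < ap.length := by omega
    rw [List.take_add_one, List.foldl_append, ih (by omega),
      List.getElem?_eq_getElem hk']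
    simp only [Option.toList_some, List.foldl_cons, List.foldl_nil]
    have hrow : ∀ c : Int, PySem.List.pyGetD ap[k] c 0 = pvA' ap (k : Int) c := by
      intro c
      rw [pvA', PySem.List.pyGetD_natCast, List.getD_eq_getElem?_getD,
        List.getElem?_eq_getElem hk']
      simp
    have hstep : pvBTabStep ((W : Nat) : Int)
        ((List.range (k + 1)).map (pvRowT ap W), pvRowT ap W k) ap[k]
        = ((List.range (k + 1)).map (pvRowT ap W) ++ [pvRowT ap W (k + 1)],
           pvRowT ap W (k + 1)) := by
      simp only [pvBTabStep]
      rw [pvBRowT_step ap W k ap[k] hrow]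
    rw [hstep]
    refine Prod.ext ?_ rfl
    rw [List.range_succ (n := k + 1), List.map_append]
    simp

lemma pvBSel_eq (ap : List (List Int)) (sz : Nat) (wid : Int) (H W : Nat)
    (hwW : wid = (W : Int)) (y : Int)
    (h0 : 0 ≤ y) (h1 : y + (sz : Int) ≤ (H : Int)) (st : Option Int × Option (Int × Int)) :
    pvBSelStep ((List.range (H + 1)).map (pvRowT ap W)) wid (sz : Int) st y
      = pvCanonX ap sz y 0 (wid - (sz : Int) + 1) st := by
  have hytop : PySem.List.pyGetD ((List.range (H + 1)).map (pvRowT ap W)) y []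
      = pvRowT ap W y.toNat := by
    rw [show y = ((y.toNat : Nat) : Int) by omega, PySem.List.pyGetD_natCast,
      List.getD_eq_getElem?_getD, List.getElem?_map, List.getElem?_range (by omega)]
    simp only [Option.map_some, Option.getD_some, Int.toNat_natCast]
  have hybot : PySem.List.pyGetD ((List.range (H + 1)).map (pvRowT ap W)) (y + (sz : Int)) []
      = pvRowT ap W (y.toNat + sz) := by
    rw [show y + (sz : Int) = ((y.toNat + sz : Nat) : Int) by omega, PySem.List.pyGetD_natCast,
      List.getD_eq_getElem?_getD, List.getElem?_map, List.getElem?_range (by omega)]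
    simp only [Option.map_some, Option.getD_some]
  simp only [pvBSelStep, hytop, hybot, pvCanonX]
  refine PySem.List.foldl_congr_mem _ _ _ _ ?_
  intro acc x hx
  rw [PySem.List.mem_pyRange_one] at hx
  have hx0 : 0 ≤ x := hx.1
  have hxW : x.toNat + sz ≤ W := by omega
  have hv : PySem.List.pyGetD (pvRowT ap W (y.toNat + sz)) (x + (sz : Int)) 0
        - PySem.List.pyGetD (pvRowT ap W y.toNat) (x + (sz : Int)) 0
        - PySem.List.pyGetD (pvRowT ap W (y.toNat + sz)) x 0
        + PySem.List.pyGetD (pvRowT ap W y.toNat) x 0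
      = pvV ap sz y x := by
    rw [pvRowTGet ap W (y.toNat + sz) (x + (sz : Int)) (by omega) (by omega),
      pvRowTGet ap W y.toNat (x + (sz : Int)) (by omega) (by omega),
      pvRowTGet ap W (y.toNat + sz) x (by omega) (by omega),
      pvRowTGet ap W y.toNat x (by omega) (by omega),
      show (x + (sz : Int)).toNat = x.toNat + sz by omega]
    have := pvFourCorner ap sz y.toNat x.toNat
    rw [show ((y.toNat : Nat) : Int) = y by omega, show ((x.toNat : Nat) : Int) = x by omega] at this
    exact this
  simp only [pvSel, hv]


theorem find_best_of_size_spec : Claim_equal_find_best_of_size := by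
  intro ap size _hdom hpre
  obtain ⟨hne, hs0, hsh, hsw, _hrows⟩ := hpre
  unfold Spec_find_best_of_size
  cases ap with
  | nil => exact absurd rfl hne
  | cons r0 rest =>
    have hzero : PySem.List.pyGetD (r0 :: rest) 0 [] = r0 := by
      rw [PySem.List.pyGetD_zero]
      rfl
    have hsz : size = ((size.toNat : Nat) : Int) := by omega
    simp only [List.headD_cons] at hsw
    rw [hsz] at hsw hsh ⊢
    -- abbreviations
    set sz : Nat := size.toNat with hszdef
    set ap : List (List Int) := r0 :: rest with hap
    set W : Nat := r0.length with hWdef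
    set H : Nat := ap.length with hHdef
    -- unfold both ports (zeta-reducing the lets)
    simp only [find_best_of_size, find_best_of_size_alt, PySem.List.len_eq, hzero]
    -- A side: initial columns, then the outer loop
    rw [pvColsInit ap sz (W : Int)]
    rw [pvAOuter_fold ap sz (H : Int) (W : Int) hsw ((H : Int) - (sz : Int) + 1).toNat 0
      le_rfl (by omega) (none, none)]
    -- B side: the prefix table …
    have hzrow : PySem.List.pyRepeat [(0 : Int)] ((W : Int) + 1) = pvRowT ap W 0 := by
      rw [PySem.List.pyRepeat_singleton, show ((W : Int) + 1).toNat = W + 1 by omega, pvRowT]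
      have : ∀ j ∈ List.range (W + 1), pvRect ap 0 j = (fun _ => (0 : Int)) j := by
        intro j _
        simp [pvRect]
      rw [List.map_congr_left this, List.map_const', List.length_range]
    rw [hzrow, show ap.foldl (pvBTabStep (W : Int)) ([pvRowT ap W 0], pvRowT ap W 0)
        = (ap.take ap.length).foldl (pvBTabStep (W : Int)) ([pvRowT ap W 0], pvRowT ap W 0)
        by rw [List.take_length],
      pvBTab_eq ap W ap.length le_rfl]
    -- … and the selection loop
    rw [PySem.List.foldl_congr_mem (PySem.List.pyRange 0 ((H : Int) - (sz : Int) + 1) 1)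
      (pvBSelStep ((List.range (H + 1)).map (pvRowT ap W)) (W : Int) (sz : Int))
      (fun st y => pvCanonX ap sz y 0 ((W : Int) - (sz : Int) + 1) st) (none, none)
      (fun acc y hy => by
        rw [PySem.List.mem_pyRange_one] at hy
        exact pvBSel_eq ap sz (W : Int) H W rfl y hy.1 (by omega) acc)]
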